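-- pv_equiv track=rewrite | github.com/sgavriil01/Polyglot-Meeting-Assistant | backend/src/models/search.py | _create_snippet
-- ===== SOURCE A (Python) =====
-- def _create_snippet(text: str, query: str, snippet_length: int = 200) -> str:
--     """
--     Create a snippet highlighting query terms
--
--     Args:
--         text: Full text
--         query: Search query
--         snippet_length: Maximum snippet length
--
--     Returns:
--         Text snippet with query context
--     """
--     query_words = query.lower().split()
--     text_lower = text.lower()
--
--     # Find best position for snippet
--     best_pos = 0
--     max_matches = 0
--
--     for i in range(len(text) - snippet_length + 1):
--         snippet = text[i:i + snippet_length].lower()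
--         matches = sum(1 for word in query_words if word in snippet)
--
--         if matches > max_matches:
--             max_matches = matches
--             best_pos = i
--
--     # Extract snippet
--     snippet = text[best_pos:best_pos + snippet_length]
--
--     # Add ellipsis if needed
--     if best_pos > 0:
--         snippet = "..." + snippet
--     if best_pos + snippet_length < len(text):
--         snippet = snippet + "..."
--
--     return snippet.strip()
-- ===== SOURCE B (Python) =====
-- def _create_snippet(text: str, query: str, snippet_length: int = 200) -> str:
--     """Difference-array re-implementation: for each query word, mark (as disjoint
--     index intervals, +1/-1 in a difference array) the windows whose substring
--     contains it, then one prefix-sum sweep picks the earliest best window."""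
--     query_words = query.lower().split()
--     text_lower = text.lower()
--     n = len(text)
--     W = n - snippet_length + 1
--     diff = [0] * (max(W, 0) + 1)
--     for w in query_words:
--         lw = len(w)
--         d = snippet_length - lw
--         prev = -1
--         for p in range(n - lw + 1):
--             if text_lower[p:p + lw] == w:
--                 # windows i with first occurrence >= i equal to p, and p <= i + d
--                 lo = max(prev + 1, p - d)
--                 hi = min(p, W - 1)
--                 if lo <= hi:
--                     diff[lo] += 1
--                     diff[hi + 1] -= 1
--                 prev = p
--     best_pos = 0
--     max_matches = 0
--     cur = 0
--     for i in range(W):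
--         cur += diff[i]
--         if cur > max_matches:
--             max_matches = cur
--             best_pos = i
--     snippet = text[best_pos:best_pos + snippet_length]
--     if best_pos > 0:
--         snippet = "..." + snippet
--     if best_pos + snippet_length < n:
--         snippet = snippet + "..."
--     return snippet.strip()
-- ===== Notes on version B (the rewrite author's own statement) =====
-- stated objective: faster
-- what changed: Instead of slicing, lowering and substring-scanning every window (O(n·Q·L)), B lowers the text once, finds each query word's occurrence positions in one pass, marks the windows each occurrence covers as disjoint +1/-1 intervals in a difference array, and picks the earliest maximum with a single prefix-sum sweep.
-- outside the precondition, e.g. on _create_snippet('abcdefghij', 'fgh', -5): A returns '...defgh...', B returns 'abcde...'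
import Mathlib
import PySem

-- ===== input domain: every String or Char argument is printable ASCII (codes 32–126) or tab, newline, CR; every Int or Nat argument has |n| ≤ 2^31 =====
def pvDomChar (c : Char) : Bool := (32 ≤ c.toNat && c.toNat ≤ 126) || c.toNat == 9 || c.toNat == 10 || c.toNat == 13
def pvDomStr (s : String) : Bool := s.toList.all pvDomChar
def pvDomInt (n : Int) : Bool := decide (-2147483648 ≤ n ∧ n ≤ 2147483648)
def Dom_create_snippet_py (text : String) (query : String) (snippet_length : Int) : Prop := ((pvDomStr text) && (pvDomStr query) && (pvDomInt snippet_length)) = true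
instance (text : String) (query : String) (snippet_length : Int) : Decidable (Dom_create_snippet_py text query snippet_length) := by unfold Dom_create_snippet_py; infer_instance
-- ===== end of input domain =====

-- B replaces A's per-window substring scans by per-word occurrence intervals in a
-- difference array plus one prefix-sum sweep (measurably faster); return values agree
-- for every snippet_length ≥ 0 (negative lengths, outside the natural domain, excluded by Pre_).

-- ===== PORT A =====
def create_snippet_py (text : String) (query : String) (snippet_length : Int) : String :=
  let query_words := PySem.Str.split₀ (PySem.Str.lower query)
  let _text_lower := PySem.Str.lower text   -- A computes text_lower but never uses it
  -- for i in range(len(text) - snippet_length + 1): … (state = (best_pos, max_matches))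
  let st := (PySem.List.pyRange 0 (PySem.Str.len text - snippet_length + 1)).foldl
    (fun (st : Int × Int) i =>
      let snippet := PySem.Str.lower (PySem.Str.slice text (some i) (some (i + snippet_length)))
      -- sum(1 for word in query_words if word in snippet)
      let matchesv : Int := (query_words.countP (fun w => PySem.Str.isIn w snippet) : Nat)
      if st.2 < matchesv then (i, matchesv) else st) (0, 0)
  let best_pos := st.1
  -- snippet = text[best_pos:best_pos+snippet_length]; "..." added on the char list (Python str +)
  let snippet := (PySem.Str.slice text (some best_pos) (some (best_pos + snippet_length))).toList
  let snippet := if 0 < best_pos then '.' :: '.' :: '.' :: snippet else snippet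
  let snippet := if best_pos + snippet_length < PySem.Str.len text then snippet ++ ['.', '.', '.'] else snippet
  String.ofList (PySem.Chars.strip snippet)

-- ===== PORT B =====
-- diff[j] += c  (Python list item assignment; every index used is provably in range)
def pvBump (l : List Int) (j : Nat) (c : Int) : List Int := l.set j (l.getD j 0 + c)

def create_snippet_py_alt (text : String) (query : String) (snippet_length : Int) : String :=
  let query_words := PySem.Str.split₀ (PySem.Str.lower query)
  let tl := (PySem.Str.lower text).toList
  let n : Int := PySem.Str.len text
  let W : Int := n - snippet_length + 1
  -- diff = [0] * (max(W, 0) + 1)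
  let diff : List Int := List.replicate ((max W 0).toNat + 1) 0
  let diff := query_words.foldl (fun diff w =>
      let lw : Int := PySem.Str.len w
      let d : Int := snippet_length - lw
      -- for p in range(n - lw + 1): if text_lower[p:p+lw] == w: … (state = (diff, prev))
      let st := (PySem.List.pyRange 0 (n - lw + 1)).foldl
        (fun (st : List Int × Int) p =>
          if PySem.Chars.slice tl (some p) (some (p + lw)) = w.toList then
            let lo := max (st.2 + 1) (p - d)
            let hi := min p (W - 1)
            let diff := if lo ≤ hi then pvBump (pvBump st.1 lo.toNat 1) (hi + 1).toNat (-1) else st.1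
            (diff, p)
          else st) (diff, -1)
      st.1) diff
  -- prefix-sum sweep: state = (best_pos, max_matches, cur); diff[i] is in range for 0 ≤ i < W
  let sw := (PySem.List.pyRange 0 W).foldl
      (fun (st : Int × Int × Int) i =>
        let cur := st.2.2 + diff.getD i.toNat 0
        if st.2.1 < cur then (i, cur, cur) else (st.1, st.2.1, cur)) (0, 0, 0)
  let best_pos := sw.1
  let snippet := (PySem.Str.slice text (some best_pos) (some (best_pos + snippet_length))).toList
  let snippet := if 0 < best_pos then '.' :: '.' :: '.' :: snippet else snippet
  let snippet := if best_pos + snippet_length < n then snippet ++ ['.', '.', '.'] else snippet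
  String.ofList (PySem.Chars.strip snippet)

-- ===== PRECONDITION & SPEC =====
-- Pre_ excludes snippet_length < 0, outside the function's natural domain: there A's
-- window slices text[i:i+L] hit Python's negative-index wraparound and B (whose interval
-- arithmetic has no window to cover) keeps position 0 instead.
def Pre_create_snippet_py (text : String) (query : String) (snippet_length : Int) : Prop :=
  0 ≤ snippet_length
instance (text : String) (query : String) (snippet_length : Int) : Decidable (Pre_create_snippet_py text query snippet_length) := by unfold Pre_create_snippet_py; infer_instance

def pvWitness_create_snippet_py : String × String × Int := ("hello world, hello there", "hello there", 11)

def Spec_create_snippet_py (text : String) (query : String) (snippet_length : Int) (out : String) : Prop := out = create_snippet_py_alt text query snippet_length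
instance (text : String) (query : String) (snippet_length : Int) (out : String) : Decidable (Spec_create_snippet_py text query snippet_length out) := by unfold Spec_create_snippet_py; infer_instance

-- ===== CLAIM (what is proved, stated in full; the proofs are below) =====
def Claim_equal_create_snippet_py : Prop := ∀ (text : String) (query : String) (snippet_length : Int), Dom_create_snippet_py text query snippet_length → Pre_create_snippet_py text query snippet_length → Spec_create_snippet_py text query snippet_length (create_snippet_py text query snippet_length)

-- ===== LEMMAS AND PROOFS =====

-- ---- difference-array arithmetic ----
theorem pvBump_length (l : List Int) (j : Nat) (c : Int) : (pvBump l j c).length = l.length := by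
  simp [pvBump]

def pvSumTake (k : Nat) (l : List Int) : Int := (l.take k).sum

theorem pvSumTake_succ (l : List Int) (k : Nat) (h : k < l.length) :
    pvSumTake (k+1) l = pvSumTake k l + l.getD k 0 := by
  unfold pvSumTake
  rw [List.take_add_one, List.sum_append]
  simp [List.getElem?_eq_getElem h, List.getD]

theorem pvSumTake_bump (l : List Int) (j : Nat) (c : Int) (k : Nat) (h : j < l.length) :
    pvSumTake k (pvBump l j c) = pvSumTake k l + if j < k then c else 0 := by
  unfold pvSumTake pvBump
  rw [List.take_set]
  by_cases hjk : j < k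
  · have hjl : j < (l.take k).length := by simp [hjk, h]
    rw [List.sum_set]
    have hd : (l.take k).drop j = (l.take k).getD j 0 :: (l.take k).drop (j+1) := by
      rw [List.drop_eq_getElem_cons hjl]
      simp [List.getD, List.getElem?_eq_getElem hjl]
    have h2 : (l.take k).sum = ((l.take k).take j).sum + ((l.take k).getD j 0 + ((l.take k).drop (j+1)).sum) := by
      conv_lhs => rw [← List.take_append_drop j (l.take k)]
      rw [List.sum_append, hd]
      simp
    have hgd : (l.take k).getD j 0 = l.getD j 0 := by
      simp [List.getD, hjk]
    rw [if_pos hjl, h2, hgd]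
    simp only [List.getD]
    rw [if_pos hjk]
    ring
  · rw [List.set_eq_of_length_le (by simp; omega)]
    simp [hjk]

theorem pvSumTake_replicate (m k : Nat) : pvSumTake k (List.replicate m (0:Int)) = 0 := by
  unfold pvSumTake
  rw [List.take_replicate]
  simp

-- ---- occurrence lists ----
-- the sorted list of match positions of w in tl (what B's inner scan visits)
def pvOcc (tl w : List Char) (n : Int) : List Int :=
  (PySem.List.pyRange 0 (n - (w.length : Int) + 1)).filter
    (fun p => decide (PySem.Chars.slice tl (some p) (some (p + (w.length : Int))) = w))

theorem pvOcc_pairwise (tl w : List Char) (n : Int) : (pvOcc tl w n).Pairwise (· < ·) := by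
  apply List.Pairwise.filter
  rw [PySem.List.pyRange_one]
  exact (List.pairwise_lt_range).map _ (by intro a b hab; omega)

theorem pvOcc_mem (tl w : List Char) (n : Int) (hn : n = (tl.length : Int)) (p : Int) :
    p ∈ pvOcc tl w n ↔ 0 ≤ p ∧ p.toNat + w.length ≤ tl.length ∧ w <+: tl.drop p.toNat := by
  unfold pvOcc
  rw [List.mem_filter, PySem.List.mem_pyRange_one]
  simp only [decide_eq_true_eq, PySem.Chars.slice_eq_listSlice]
  constructor
  · rintro ⟨⟨hp0, hpn⟩, hs⟩
    rw [PySem.List.slice_toNat tl hp0 (by omega)] at hs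
    have htn : (p + (w.length:Int)).toNat - p.toNat = w.length := by omega
    rw [htn] at hs
    have hlen : ((tl.drop p.toNat).take w.length).length = w.length := by rw [hs]
    simp only [List.length_take, List.length_drop] at hlen
    refine ⟨hp0, by omega, ?_⟩
    rw [← hs]; exact List.take_prefix _ _
  · rintro ⟨hp0, hlen, hpre⟩
    refine ⟨⟨hp0, by omega⟩, ?_⟩
    rw [PySem.List.slice_toNat tl hp0 (by omega)]
    have htn : (p + (w.length:Int)).toNat - p.toNat = w.length := by omega
    rw [htn]
    rw [List.prefix_iff_eq_take] at hpre
    rw [← hpre]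

-- ---- per-window containment characterisation (A's substring test = B's intervals) ----
theorem pvWindow_iff (tl w : List Char) (L i n : Int) (hn : n = (tl.length : Int))
    (hL : 0 ≤ L) (hi : 0 ≤ i) (hin : i ≤ n - L) :
    PySem.Chars.isIn w (PySem.List.slice tl (some i) (some (i + L))) = true ↔
    ∃ p ∈ pvOcc tl w n, i ≤ p ∧ p ≤ i + (L - (w.length : Int)) := by
  rw [← PySem.Chars.exists_prefix_drop_iff_isIn]
  rw [PySem.List.slice_toNat tl hi (by omega)]
  have hiL : (i + L).toNat - i.toNat = L.toNat := by omega
  rw [hiL]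
  constructor
  · rintro ⟨j, hj⟩
    rw [List.drop_take, List.drop_drop] at hj
    rw [List.prefix_take_iff] at hj
    obtain ⟨hpre, hlw⟩ := hj
    by_cases hw : w = []
    · subst hw
      refine ⟨i, ?_, le_refl _, by simp; omega⟩
      rw [pvOcc_mem tl [] n hn]
      exact ⟨hi, by simp; omega, List.nil_prefix⟩
    · have hwpos : 0 < w.length := List.length_pos_iff.mpr hw
      have hjL : j + w.length ≤ L.toNat := by omega
      refine ⟨i + (j : Int), ?_, by omega, by omega⟩
      rw [pvOcc_mem tl w n hn]
      have hlen2 : w.length ≤ (tl.drop (i.toNat + j)).length := hpre.length_le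
      simp only [List.length_drop] at hlen2
      have htn2 : (i + (j:Int)).toNat = i.toNat + j := by omega
      rw [htn2]
      exact ⟨by omega, by omega, hpre⟩
  · rintro ⟨p, hmem, hip, hpd⟩
    rw [pvOcc_mem tl w n hn] at hmem
    obtain ⟨hp0, hplen, hpre⟩ := hmem
    refine ⟨p.toNat - i.toNat, ?_⟩
    rw [List.drop_take, List.drop_drop, List.prefix_take_iff]
    have htn3 : i.toNat + (p.toNat - i.toNat) = p.toNat := by omega
    rw [htn3]
    exact ⟨hpre, by omega⟩

-- ---- B's inner scan, restricted to the occurrence list ----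
def pvIStep (d W : Int) (st : List Int × Int) (p : Int) : List Int × Int :=
  (if max (st.2 + 1) (p - d) ≤ min p (W - 1) then
      pvBump (pvBump st.1 (max (st.2 + 1) (p - d)).toNat 1) ((min p (W - 1)) + 1).toNat (-1)
    else st.1, p)

theorem pvStep_fold_eq (tl wl : List Char) (lw d W n : Int) (hlw : lw = (wl.length : Int))
    (st0 : List Int × Int) :
    (PySem.List.pyRange 0 (n - lw + 1)).foldl
      (fun (st : List Int × Int) p =>
        if PySem.Chars.slice tl (some p) (some (p + lw)) = wl then
          (if max (st.2 + 1) (p - d) ≤ min p (W - 1) then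
              pvBump (pvBump st.1 (max (st.2 + 1) (p - d)).toNat 1) ((min p (W - 1)) + 1).toNat (-1)
            else st.1, p)
        else st) st0
    = (pvOcc tl wl n).foldl (pvIStep d W) st0 := by
  subst hlw
  unfold pvOcc
  rw [List.foldl_filter]
  congr 1
  funext st p
  simp only [decide_eq_true_eq, pvIStep]

theorem pvIStep_fold (W d : Int) (R : List Int) (hs : R.Pairwise (· < ·))
    (D : List Int) (r : Int) (hD : D.length = (max W 0).toNat + 1) (hr : -1 ≤ r)
    (hR : ∀ p ∈ R, r < p ∧ 0 ≤ p) :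
    (R.foldl (pvIStep d W) (D, r)).1.length = D.length ∧
    ∀ iN : Nat, (iN : Int) < W →
      pvSumTake (iN+1) (R.foldl (pvIStep d W) (D, r)).1 =
      pvSumTake (iN+1) D +
        (if r < (iN:Int) ∧ ∃ p ∈ R, (iN:Int) ≤ p ∧ p ≤ (iN:Int) + d then 1 else 0) := by
  induction R generalizing D r with
  | nil => simp
  | cons p R' ih =>
    obtain ⟨hrp, hp0⟩ := hR p (List.mem_cons_self)
    have hR' : ∀ q ∈ R', p < q ∧ 0 ≤ q := by
      intro q hq
      exact ⟨(List.pairwise_cons.mp hs).1 q hq, (hR q (List.mem_cons_of_mem _ hq)).2⟩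
    have hs' : R'.Pairwise (· < ·) := (List.pairwise_cons.mp hs).2
    simp only [List.foldl_cons]
    set lo := max (r + 1) (p - d) with hlo
    set hi := min p (W - 1) with hhi
    have hstep : pvIStep d W (D, r) p =
        (if lo ≤ hi then pvBump (pvBump D lo.toNat 1) (hi + 1).toNat (-1) else D, p) := rfl
    rw [hstep]
    -- bounds on lo and hi, so that min/max can then be forgotten
    have hbA : r + 1 ≤ lo := le_max_left _ _
    have hbB : p - d ≤ lo := le_max_right _ _
    have hbC : hi ≤ p := min_le_left _ _
    have hbD : hi ≤ W - 1 := min_le_right _ _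
    have hbE : ∀ x : Int, r + 1 ≤ x → p - d ≤ x → lo ≤ x := fun x h1 h2 => max_le h1 h2
    have hbF : ∀ x : Int, x ≤ p → x ≤ W - 1 → x ≤ hi := fun x h1 h2 => le_min h1 h2
    clear_value lo hi
    set D' := if lo ≤ hi then pvBump (pvBump D lo.toNat 1) (hi + 1).toNat (-1) else D with hD'
    have hD'len : D'.length = D.length := by
      rw [hD']; split <;> simp [pvBump_length]
    obtain ⟨ihlen, ihsum⟩ := ih hs' D' p (by rw [hD'len]; exact hD) (by omega) hR'
    refine ⟨by rw [ihlen, hD'len], ?_⟩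
    intro iN hiW
    rw [ihsum iN hiW]
    have hiN0 : (0:Int) ≤ (iN:Int) := by omega
    have hWpos : 0 < W := by omega
    have hD'sum : pvSumTake (iN+1) D' = pvSumTake (iN+1) D +
        (if lo ≤ (iN:Int) ∧ (iN:Int) ≤ hi then 1 else 0) := by
      rw [hD']
      by_cases hlh : lo ≤ hi
      · rw [if_pos hlh]
        have hlo0 : 0 ≤ lo := by omega
        have hloD : lo.toNat < D.length := by rw [hD]; omega
        have hhiD : (hi + 1).toNat < (pvBump D lo.toNat 1).length := by
          rw [pvBump_length, hD]; omega
        rw [pvSumTake_bump _ _ _ _ hhiD, pvSumTake_bump _ _ _ _ hloD]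
        have c1 : (lo.toNat < iN + 1) ↔ (lo ≤ (iN:Int)) := by omega
        have c2 : ((hi+1).toNat < iN + 1) ↔ (hi < (iN:Int)) := by omega
        rw [if_congr c1 rfl rfl, if_congr c2 rfl rfl]
        split_ifs <;> omega
      · rw [if_neg hlh, if_neg (by omega)]
        simp
    rw [hD'sum]
    -- the intervals are disjoint: exactly one of them covers window iN
    by_cases hip : (iN:Int) ≤ p
    · by_cases hpd : p ≤ (iN:Int) + d
      · have hE : (r < (iN:Int) ∧ ∃ q ∈ p :: R', (iN:Int) ≤ q ∧ q ≤ (iN:Int) + d) ↔ r < (iN:Int) := by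
          constructor
          · rintro ⟨h, _⟩; exact h
          · intro h; exact ⟨h, p, List.mem_cons_self, hip, hpd⟩
        have hI : (lo ≤ (iN:Int) ∧ (iN:Int) ≤ hi) ↔ r < (iN:Int) := by
          constructor
          · rintro ⟨h1, h2⟩; omega
          · intro h; exact ⟨hbE _ (by omega) (by omega), hbF _ hip (by omega)⟩
        have hT : ¬ (p < (iN:Int) ∧ ∃ q ∈ R', (iN:Int) ≤ q ∧ q ≤ (iN:Int) + d) := by
          rintro ⟨h, _⟩; omega
        rw [if_congr hE rfl rfl, if_congr hI rfl rfl, if_neg hT]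
        ring
      · have hE : ¬ (r < (iN:Int) ∧ ∃ q ∈ p :: R', (iN:Int) ≤ q ∧ q ≤ (iN:Int) + d) := by
          rintro ⟨-, q, hq, hq1, hq2⟩
          rcases List.mem_cons.mp hq with rfl | hq'
          · omega
          · have := (hR' q hq').1; omega
        have hI : ¬ (lo ≤ (iN:Int) ∧ (iN:Int) ≤ hi) := by
          rintro ⟨h1, h2⟩; omega
        have hT : ¬ (p < (iN:Int) ∧ ∃ q ∈ R', (iN:Int) ≤ q ∧ q ≤ (iN:Int) + d) := by
          rintro ⟨h, -⟩; omega
        rw [if_neg hE, if_neg hI, if_neg hT]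
        ring
    · have hI : ¬ (lo ≤ (iN:Int) ∧ (iN:Int) ≤ hi) := by
        rintro ⟨h1, h2⟩
        have := hbC; omega
      have hE : (r < (iN:Int) ∧ ∃ q ∈ p :: R', (iN:Int) ≤ q ∧ q ≤ (iN:Int) + d) ↔
          (p < (iN:Int) ∧ ∃ q ∈ R', (iN:Int) ≤ q ∧ q ≤ (iN:Int) + d) := by
        constructor
        · rintro ⟨h1, q, hq, hq1, hq2⟩
          rcases List.mem_cons.mp hq with rfl | hq'
          · omega
          · exact ⟨by omega, q, hq', hq1, hq2⟩
        · rintro ⟨h1, q, hq', hq1, hq2⟩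
          exact ⟨by omega, q, List.mem_cons_of_mem _ hq', hq1, hq2⟩
      rw [if_neg hI, if_congr hE rfl rfl]
      ring

-- ---- the whole word loop (all query words folded over the difference array) ----
theorem pvWords_fold (tl : List Char) (n W L : Int) (hn : n = (tl.length : Int))
    (ws : List String) (D : List Int) (hD : D.length = (max W 0).toNat + 1) :
    (ws.foldl (fun D w =>
        ((PySem.List.pyRange 0 (n - PySem.Str.len w + 1)).foldl
          (fun (st : List Int × Int) p =>
            if PySem.Chars.slice tl (some p) (some (p + PySem.Str.len w)) = w.toList then
              (if max (st.2 + 1) (p - (L - PySem.Str.len w)) ≤ min p (W - 1) then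
                  pvBump (pvBump st.1 (max (st.2 + 1) (p - (L - PySem.Str.len w))).toNat 1)
                    ((min p (W - 1)) + 1).toNat (-1)
                else st.1, p)
            else st) (D, -1)).1) D).length = D.length ∧
    ∀ iN : Nat, (iN : Int) < W →
      pvSumTake (iN+1) (ws.foldl (fun D w =>
        ((PySem.List.pyRange 0 (n - PySem.Str.len w + 1)).foldl
          (fun (st : List Int × Int) p =>
            if PySem.Chars.slice tl (some p) (some (p + PySem.Str.len w)) = w.toList then
              (if max (st.2 + 1) (p - (L - PySem.Str.len w)) ≤ min p (W - 1) then
                  pvBump (pvBump st.1 (max (st.2 + 1) (p - (L - PySem.Str.len w))).toNat 1)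
                    ((min p (W - 1)) + 1).toNat (-1)
                else st.1, p)
            else st) (D, -1)).1) D) =
      pvSumTake (iN+1) D +
        (ws.countP (fun w => decide (∃ p ∈ pvOcc tl w.toList n,
            (iN:Int) ≤ p ∧ p ≤ (iN:Int) + (L - (w.toList.length : Int)))) : Nat) := by
  induction ws generalizing D with
  | nil => simp
  | cons w ws' ih =>
    simp only [List.foldl_cons]
    have hlw : PySem.Str.len w = (w.toList.length : Int) := PySem.Str.len_eq w
    rw [pvStep_fold_eq tl w.toList (PySem.Str.len w) (L - PySem.Str.len w) W n hlw (D, -1)]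
    obtain ⟨hlen1, hsum1⟩ := pvIStep_fold W (L - PySem.Str.len w) (pvOcc tl w.toList n)
      (pvOcc_pairwise tl w.toList n) D (-1) hD (le_refl _)
      (by intro p hp
          rw [pvOcc_mem tl w.toList n hn] at hp
          exact ⟨by omega, hp.1⟩)
    obtain ⟨hlen2, hsum2⟩ := ih _ (by rw [hlen1]; exact hD)
    refine ⟨by rw [hlen2, hlen1], ?_⟩
    intro iN hiW
    rw [hsum2 iN hiW, hsum1 iN hiW]
    have hr : (-1:Int) < (iN:Int) := by omega
    rw [List.countP_cons]
    have hsplit : (if (-1:Int) < (iN:Int) ∧ ∃ p ∈ pvOcc tl w.toList n,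
          (iN:Int) ≤ p ∧ p ≤ (iN:Int) + (L - PySem.Str.len w) then (1:Int) else 0) =
        if (decide (∃ p ∈ pvOcc tl w.toList n,
          (iN:Int) ≤ p ∧ p ≤ (iN:Int) + (L - (w.toList.length : Int)))) = true then 1 else 0 := by
      rw [hlw]
      simp only [decide_eq_true_eq]
      apply if_congr _ rfl rfl
      constructor
      · rintro ⟨-, h⟩; exact h
      · intro h; exact ⟨hr, h⟩
    rw [hsplit]
    push_cast
    split <;> ring

-- ---- sweep loop vs A's argmax loop ----
theorem pvSweep_eq (W : Int) (m : Int → Int) (D : List Int)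
    (hD : D.length = (max W 0).toNat + 1)
    (hm : ∀ iN : Nat, (iN:Int) < W → m (iN:Int) = pvSumTake (iN+1) D) :
    ∀ (k : Nat) (a b1 m1 cur : Int), 0 ≤ a → (W - a).toNat ≤ k → cur = pvSumTake a.toNat D →
      ((PySem.List.pyRange a W).foldl (fun (st : Int × Int) i =>
          if st.2 < m i then (i, m i) else st) (b1, m1)) =
      ((((PySem.List.pyRange a W).foldl (fun (st : Int × Int × Int) i =>
          if st.2.1 < st.2.2 + D.getD i.toNat 0 then (i, st.2.2 + D.getD i.toNat 0, st.2.2 + D.getD i.toNat 0)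
          else (st.1, st.2.1, st.2.2 + D.getD i.toNat 0)) (b1, m1, cur))).1,
       (((PySem.List.pyRange a W).foldl (fun (st : Int × Int × Int) i =>
          if st.2.1 < st.2.2 + D.getD i.toNat 0 then (i, st.2.2 + D.getD i.toNat 0, st.2.2 + D.getD i.toNat 0)
          else (st.1, st.2.1, st.2.2 + D.getD i.toNat 0)) (b1, m1, cur))).2.1) := by
  intro k
  induction k with
  | zero =>
    intro a b1 m1 cur ha hk hcur
    have hWa : W ≤ a := by omega
    have hnil : PySem.List.pyRange a W = [] := by
      rw [PySem.List.pyRange_one]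
      have : (W - a).toNat = 0 := by omega
      rw [this]
      simp
    rw [hnil]
    simp
  | succ k ihk =>
    intro a b1 m1 cur ha hk hcur
    by_cases hWa : W ≤ a
    · have hnil : PySem.List.pyRange a W = [] := by
        rw [PySem.List.pyRange_one]
        have : (W - a).toNat = 0 := by omega
        rw [this]
        simp
      rw [hnil]
      simp
    · have haW : a < W := by omega
      rw [PySem.List.pyRange_one_cons haW]
      simp only [List.foldl_cons]
      have haD : a.toNat < D.length := by rw [hD]; omega
      have hcur' : cur + D.getD a.toNat 0 = m a := by
        have h1 : m ((a.toNat : Nat) : Int) = pvSumTake (a.toNat+1) D := hm a.toNat (by omega)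
        have h2 : ((a.toNat : Nat) : Int) = a := by omega
        rw [h2] at h1
        rw [h1, pvSumTake_succ D a.toNat haD, hcur]
      rw [hcur']
      by_cases hc : m1 < m a
      · rw [if_pos hc, if_pos hc]
        exact ihk (a+1) a (m a) (m a) (by omega) (by omega)
          (by rw [← hcur']
              have : (a+1).toNat = a.toNat + 1 := by omega
              rw [this, pvSumTake_succ D a.toNat haD, hcur])
      · rw [if_neg hc, if_neg hc]
        exact ihk (a+1) b1 m1 (m a) (by omega) (by omega)
          (by rw [← hcur']
              have : (a+1).toNat = a.toNat + 1 := by omega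
              rw [this, pvSumTake_succ D a.toNat haD, hcur])

theorem create_snippet_py_witness_ok :
    Dom_create_snippet_py pvWitness_create_snippet_py.1 pvWitness_create_snippet_py.2.1 pvWitness_create_snippet_py.2.2 ∧
    Pre_create_snippet_py pvWitness_create_snippet_py.1 pvWitness_create_snippet_py.2.1 pvWitness_create_snippet_py.2.2 := by
  constructor <;> decide

-- ---- bridges between the String level and the List Char level ----
theorem pvLowerSlice (s : List Char) (a b : Int) (ha : 0 ≤ a) (hb : 0 ≤ b) :
    PySem.Chars.lower (PySem.List.slice s (some a) (some b)) =
    PySem.List.slice (PySem.Chars.lower s) (some a) (some b) := by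
  rw [PySem.List.slice_toNat s ha hb, PySem.List.slice_toNat (PySem.Chars.lower s) ha hb]
  simp [PySem.Chars.lower, List.map_take, List.map_drop]

theorem pvLowerLen (s : List Char) : (PySem.Chars.lower s).length = s.length := by
  simp [PySem.Chars.lower]

-- A's per-window membership test, as a predicate over B's occurrence list
theorem pvPredBridge (text w : String) (i L : Int) (hL : 0 ≤ L) (hi : 0 ≤ i)
    (hin : i ≤ PySem.Str.len text - L) :
    PySem.Str.isIn w (PySem.Str.lower (PySem.Str.slice text (some i) (some (i + L)))) =
    decide (∃ p ∈ pvOcc ((PySem.Str.lower text).toList) w.toList (PySem.Str.len text),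
      i ≤ p ∧ p ≤ i + (L - (w.toList.length : Int))) := by
  have hn : PySem.Str.len text = (((PySem.Str.lower text).toList).length : Int) := by
    rw [PySem.Str.len_eq, PySem.Str.toList_lower, pvLowerLen]
  have h1 : PySem.Str.isIn w (PySem.Str.lower (PySem.Str.slice text (some i) (some (i + L)))) =
      PySem.Chars.isIn w.toList
        (PySem.List.slice ((PySem.Str.lower text).toList) (some i) (some (i + L))) := by
    rw [PySem.Str.isIn_eq, PySem.Str.toList_lower, PySem.Str.toList_slice,
      PySem.Chars.slice_eq_listSlice, pvLowerSlice _ _ _ hi (by omega), PySem.Str.toList_lower]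
  rw [h1, Bool.eq_iff_iff]
  simp only [decide_eq_true_eq]
  exact pvWindow_iff ((PySem.Str.lower text).toList) w.toList L i (PySem.Str.len text) hn hL hi
    (by omega)

-- the shared snippet-assembly tail of both ports
def pvTail (text : String) (L best_pos : Int) : String :=
  let snippet := (PySem.Str.slice text (some best_pos) (some (best_pos + L))).toList
  let snippet := if 0 < best_pos then '.' :: '.' :: '.' :: snippet else snippet
  let snippet := if best_pos + L < PySem.Str.len text then snippet ++ ['.', '.', '.'] else snippet
  String.ofList (PySem.Chars.strip snippet)

-- ---- the two ports, re-expressed through named components (definitionally equal) ----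
def pvM (text query : String) (L : Int) (i : Int) : Int :=
  ((PySem.Str.split₀ (PySem.Str.lower query)).countP
    (fun w => PySem.Str.isIn w (PySem.Str.lower (PySem.Str.slice text (some i) (some (i + L))))) : Nat)

def pvABest (text query : String) (L : Int) : Int :=
  ((PySem.List.pyRange 0 (PySem.Str.len text - L + 1)).foldl
    (fun (st : Int × Int) i =>
      if st.2 < pvM text query L i then (i, pvM text query L i) else st) (0, 0)).1

def pvDiff (text query : String) (L : Int) : List Int :=
  (PySem.Str.split₀ (PySem.Str.lower query)).foldl (fun D w =>
      ((PySem.List.pyRange 0 (PySem.Str.len text - PySem.Str.len w + 1)).foldl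
        (fun (st : List Int × Int) p =>
          if PySem.Chars.slice ((PySem.Str.lower text).toList) (some p) (some (p + PySem.Str.len w)) = w.toList then
            (if max (st.2 + 1) (p - (L - PySem.Str.len w)) ≤ min p ((PySem.Str.len text - L + 1) - 1) then
                pvBump (pvBump st.1 (max (st.2 + 1) (p - (L - PySem.Str.len w))).toNat 1)
                  ((min p ((PySem.Str.len text - L + 1) - 1)) + 1).toNat (-1)
              else st.1, p)
          else st) (D, -1)).1)
    (List.replicate ((max (PySem.Str.len text - L + 1) 0).toNat + 1) (0:Int))

def pvBBest (text query : String) (L : Int) : Int :=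
  ((PySem.List.pyRange 0 (PySem.Str.len text - L + 1)).foldl
    (fun (st : Int × Int × Int) i =>
      if st.2.1 < st.2.2 + (pvDiff text query L).getD i.toNat 0 then
        (i, st.2.2 + (pvDiff text query L).getD i.toNat 0, st.2.2 + (pvDiff text query L).getD i.toNat 0)
      else (st.1, st.2.1, st.2.2 + (pvDiff text query L).getD i.toNat 0)) (0, 0, 0)).1

set_option maxHeartbeats 1000000 in
theorem pvA_eq (text query : String) (L : Int) :
    create_snippet_py text query L = pvTail text L (pvABest text query L) := rfl

set_option maxHeartbeats 1000000 in
theorem pvB_eq (text query : String) (L : Int) :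
    create_snippet_py_alt text query L = pvTail text L (pvBBest text query L) := rfl

-- the two best positions coincide
set_option maxHeartbeats 1000000 in
theorem pvBest_eq (text query : String) (L : Int) (hL : 0 ≤ L) :
    pvABest text query L = pvBBest text query L := by
  have hn : PySem.Str.len text = (((PySem.Str.lower text).toList).length : Int) := by
    rw [PySem.Str.len_eq, PySem.Str.toList_lower, pvLowerLen]
  obtain ⟨hlenD, hsumD⟩ := pvWords_fold ((PySem.Str.lower text).toList) (PySem.Str.len text)
    (PySem.Str.len text - L + 1) L hn (PySem.Str.split₀ (PySem.Str.lower query))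
    (List.replicate ((max (PySem.Str.len text - L + 1) 0).toNat + 1) (0:Int)) (by simp)
  have hDf : (pvDiff text query L).length = (max (PySem.Str.len text - L + 1) 0).toNat + 1 := by
    have h := hlenD
    simp only [List.length_replicate] at h
    exact h
  have hm : ∀ iN : Nat, (iN:Int) < PySem.Str.len text - L + 1 →
      pvM text query L (iN:Int) = pvSumTake (iN+1) (pvDiff text query L) := by
    intro iN hiW
    have e1 : pvSumTake (iN+1) (pvDiff text query L) =
        pvSumTake (iN+1) (List.replicate ((max (PySem.Str.len text - L + 1) 0).toNat + 1) (0:Int)) +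
        (((PySem.Str.split₀ (PySem.Str.lower query)).countP
          (fun w => decide (∃ p ∈ pvOcc ((PySem.Str.lower text).toList) w.toList (PySem.Str.len text),
            (iN:Int) ≤ p ∧ p ≤ (iN:Int) + (L - (w.toList.length : Int))))) : Nat) := hsumD iN hiW
    rw [pvSumTake_replicate, zero_add] at e1
    rw [e1]
    unfold pvM
    exact congrArg (fun n : Nat => (n : Int))
      (List.countP_congr (fun w _ => by
        rw [pvPredBridge text w (iN:Int) L hL (by omega) (by omega)]))
  unfold pvABest pvBBest
  exact congrArg Prod.fst
    (pvSweep_eq (PySem.Str.len text - L + 1) (pvM text query L) (pvDiff text query L) hDf hm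
      (PySem.Str.len text - L + 1).toNat 0 0 0 0 (le_refl 0) (by omega) (by simp [pvSumTake]))

-- ===== VERDICT (by name: the statement is the Claim_ definition above) =====
theorem create_snippet_py_spec : Claim_equal_create_snippet_py := by
  intro text query snippet_length _hdom hpre
  unfold Spec_create_snippet_py
  rw [pvA_eq, pvB_eq, pvBest_eq text query snippet_length hpre]
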